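-- pv_equiv track=rewrite | github.com/Initiator-Z/AC-power-mod | ac_new.py | final_power
-- ===== SOURCE A (Python) =====
-- def final_power(original, modified):
--     # Create final LUT lines with modified values.
--     res, idx = [], 0
--     for line in original:
--         l = line.strip()
--         if not l:
--             res.append(line)
--             continue
--         parts = l.split('|')
--         if len(parts) == 2 and idx < len(modified):
--             rpm = parts[0]
--             res.append(f'{rpm}|{modified[idx]}\n')
--             idx += 1
--         else:
--             res.append(line)
--     return res
-- ===== SOURCE B (Python) =====
-- def final_power(original, modified):
--     # Index pass + overwrite: locate eligible positions once, then substitute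
--     # the first len(modified) of them into a copy of the lines.
--     eligible = [i for i, line in enumerate(original)
--                 if line.strip() and len(line.strip().split('|')) == 2]
--     res = list(original)
--     for k, i in enumerate(eligible[:len(modified)]):
--         rpm = original[i].strip().split('|')[0]
--         res[i] = f'{rpm}|{modified[k]}\n'
--     return res
-- ===== Notes on version B (the rewrite author's own statement) =====
-- stated objective: alternative
-- what changed: Replaces A's single accumulator loop threading (res, idx) with a two-phase decomposition: one pass collects the positions of eligible lines, then the first len(modified) of those positions are overwritten in a copy of the original list.
import Mathlib
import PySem

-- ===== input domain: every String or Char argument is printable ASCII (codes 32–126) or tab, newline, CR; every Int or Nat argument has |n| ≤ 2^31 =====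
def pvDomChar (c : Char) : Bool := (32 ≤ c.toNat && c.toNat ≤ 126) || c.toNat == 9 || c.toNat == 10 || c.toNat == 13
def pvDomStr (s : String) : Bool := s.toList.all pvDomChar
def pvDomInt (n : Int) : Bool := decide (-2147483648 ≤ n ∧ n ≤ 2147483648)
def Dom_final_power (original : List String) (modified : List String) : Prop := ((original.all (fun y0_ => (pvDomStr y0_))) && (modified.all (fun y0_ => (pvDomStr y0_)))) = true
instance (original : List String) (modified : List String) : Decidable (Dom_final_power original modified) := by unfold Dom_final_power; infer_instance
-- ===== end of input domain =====

-- B replaces A's single accumulator loop threading (res, idx) by a two-phase decomposition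
-- (collect eligible positions, then overwrite the first len(modified) of them in a copy);
-- alternative structure, same cost. Neither version mutates its arguments.

-- ===== PORT A =====
-- the body of A's for-loop over `original`, state (res, idx)
def stepA (modified : List String) (st : List String × Nat) (line : String) : List String × Nat :=
  let l := PySem.Str.strip line
  if l = "" then (st.1 ++ [line], st.2)
  else
    let parts := (PySem.Str.split? l "|").getD []
    if parts.length = 2 ∧ st.2 < modified.length then
      (st.1 ++ [PySem.List.pyGetD parts 0 "" ++ "|" ++ modified.getD st.2 "" ++ "\n"], st.2 + 1)
    else
      (st.1 ++ [line], st.2)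

def final_power (original : List String) (modified : List String) : List String :=
  (original.foldl (stepA modified) ([], 0)).1

-- ===== PORT B =====
-- the comprehension's condition: `line.strip() and len(line.strip().split('|')) == 2`
def eligB (line : String) : Bool :=
  let l := PySem.Str.strip line
  l ≠ "" && ((PySem.Str.split? l "|").getD []).length == 2

-- `[i for i, line in enumerate(original) if …]`
def eligIdx (original : List String) : List Int :=
  (PySem.List.enumerate original).filterMap (fun p => if eligB p.2 then some p.1 else none)

-- the body of B's for-loop over `enumerate(eligible[:len(modified)])`, q = (k, i)
def stepB (original modified : List String) (res : List String) (q : Int × Int) : List String :=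
  let rpm := PySem.List.pyGetD ((PySem.Str.split? (PySem.Str.strip (PySem.List.pyGetD original q.2 "")) "|").getD []) 0 ""
  PySem.List.pySetD res q.2 (rpm ++ "|" ++ PySem.List.pyGetD modified q.1 "" ++ "\n")

def final_power_alt (original : List String) (modified : List String) : List String :=
  (PySem.List.enumerate
      (PySem.List.slice (eligIdx original) none (some (modified.length : Int)))).foldl
    (stepB original modified) original

-- ===== PRECONDITION & SPEC =====
def Spec_final_power (original : List String) (modified : List String) (out : List String) : Prop := out = final_power_alt original modified
instance (original : List String) (modified : List String) (out : List String) : Decidable (Spec_final_power original modified out) := by unfold Spec_final_power; infer_instance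

-- ===== CLAIM (what is proved, stated in full; the proofs are below) =====
def Claim_equal_final_power : Prop := ∀ (original : List String) (modified : List String), Dom_final_power original modified → Spec_final_power original modified (final_power original modified)

-- ===== LEMMAS AND PROOFS =====

def subLine (line m : String) : String :=
  PySem.List.pyGetD ((PySem.Str.split? (PySem.Str.strip line) "|").getD []) 0 "" ++ "|" ++ m ++ "\n"

-- common recursive characterisation of the result of both programs
def fpRec : List String → List String → List String
  | [], _ => []
  | line :: rest, ms =>
    if eligB line then
      match ms with
      | [] => line :: fpRec rest []
      | m :: ms' => subLine line m :: fpRec rest ms'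
    else line :: fpRec rest ms

theorem fpRec_nil_ms (l : List String) : fpRec l [] = l := by
  induction l with
  | nil => rfl
  | cons x t ih => by_cases h : eligB x <;> simp [fpRec, h, ih]

-- ---- A = fpRec ----
theorem A_loop (modified : List String) (lines : List String) :
    ∀ (acc : List String) (idx : Nat), idx ≤ modified.length →
    (lines.foldl (stepA modified) (acc, idx)).1 = acc ++ fpRec lines (modified.drop idx) := by
  induction lines with
  | nil => intro acc idx _; simp [fpRec]
  | cons line rest ih =>
    intro acc idx hidx
    rw [List.foldl_cons]
    by_cases hs : PySem.Str.strip line = ""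
    · have he : eligB line = false := by simp [eligB, hs]
      have hst : stepA modified (acc, idx) line = (acc ++ [line], idx) := by
        simp [stepA, hs]
      rw [hst, ih _ idx hidx]
      simp [fpRec, he]
    · by_cases hp : ((PySem.Str.split? (PySem.Str.strip line) "|").getD []).length = 2
      · have he : eligB line = true := by simp [eligB, hs, hp]
        by_cases hlt : idx < modified.length
        · have hst : stepA modified (acc, idx) line =
              (acc ++ [subLine line (modified.getD idx "")], idx + 1) := by
            simp [stepA, hs, hp, hlt, subLine]
          rw [hst, ih _ (idx + 1) (by omega)]
          have hdrop : modified.drop idx = modified.getD idx "" :: modified.drop (idx + 1) := by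
            rw [List.getD_eq_getElem _ _ hlt]
            exact (List.drop_eq_getElem_cons hlt).symm ▸ rfl
          rw [hdrop]
          simp [fpRec, he]
        · have hidx' : idx = modified.length := by omega
          have hdrop : modified.drop idx = [] := by simp [hidx']
          have hst : stepA modified (acc, idx) line = (acc ++ [line], idx) := by
            simp [stepA, hs, hlt]
          rw [hst, ih _ idx hidx, hdrop]
          simp [fpRec, he]
      · have he : eligB line = false := by simp [eligB, hs, hp]
        have hst : stepA modified (acc, idx) line = (acc ++ [line], idx) := by
          simp [stepA, hs, hp]
        rw [hst, ih _ idx hidx]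
        simp [fpRec, he]

theorem A_eq (original modified : List String) :
    final_power original modified = fpRec original modified := by
  have := A_loop modified original [] 0 (by omega)
  simpa [final_power] using this

-- ---- B = fpRec ----
theorem enumerate_shift {α : Type} (xs : List α) (s : Int) :
    PySem.List.enumerate xs (s + 1) = (PySem.List.enumerate xs s).map (fun p => (p.1 + 1, p.2)) := by
  induction xs generalizing s with
  | nil => simp [PySem.List.enumerate_nil]
  | cons x t ih =>
    rw [PySem.List.enumerate_cons, PySem.List.enumerate_cons, List.map_cons]
    have h2 : s + 1 + 1 = (s + 1) + 1 := by ring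
    rw [h2, ih (s + 1)]

theorem enumerate_map {α β : Type} (f : α → β) (l : List α) (s : Int) :
    PySem.List.enumerate (l.map f) s = (PySem.List.enumerate l s).map (fun p => (p.1, f p.2)) := by
  induction l generalizing s with
  | nil => simp [PySem.List.enumerate_nil]
  | cons x t ih => simp [PySem.List.enumerate_cons, ih (s + 1)]

theorem filterMap_elig_shift (l : List (Int × String)) :
    l.filterMap (fun x => if eligB x.2 then some (x.1 + 1) else none)
      = (l.filterMap (fun p => if eligB p.2 then some p.1 else none)).map (· + 1) := by
  induction l with
  | nil => rfl
  | cons a t ih =>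
    by_cases he : eligB a.2 <;> simp [he, ih]

theorem eligIdx_cons (line : String) (rest : List String) :
    eligIdx (line :: rest) =
      (if eligB line then [(0 : Int)] else []) ++ (eligIdx rest).map (· + 1) := by
  unfold eligIdx
  rw [PySem.List.enumerate_cons, List.filterMap_cons]
  have h1 : PySem.List.enumerate rest 1
      = (PySem.List.enumerate rest 0).map (fun p => (p.1 + 1, p.2)) := by
    simpa using enumerate_shift rest 0
  by_cases he : eligB line <;>
    simp [he, h1, filterMap_elig_shift]

theorem mem_eligIdx_nonneg (original : List String) : ∀ i ∈ eligIdx original, 0 ≤ i := by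
  induction original with
  | nil => intro i h; simp [eligIdx, PySem.List.enumerate_nil] at h
  | cons line rest ih =>
    intro i h
    rw [eligIdx_cons] at h
    rcases List.mem_append.1 h with h | h
    · split at h <;> simp at h
      omega
    · obtain ⟨j, hj, rfl⟩ := List.mem_map.1 h
      have := ih j hj; omega

theorem mem_enumerate_zero_nonneg {α : Type} (l : List α) :
    ∀ p ∈ PySem.List.enumerate l 0, 0 ≤ p.1 := by
  intro p hp
  obtain ⟨k, hk, rfl⟩ := (PySem.List.mem_enumerate_iff _ _ _).1 hp
  simp

theorem pyGetD_cons_succ {α : Type} (x : α) (t : List α) (j : Int) (hj : 0 ≤ j) (d : α) :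
    PySem.List.pyGetD (x :: t) (j + 1) d = PySem.List.pyGetD t j d := by
  obtain ⟨n, rfl⟩ := Int.eq_ofNat_of_zero_le hj
  have h1 : ((n : Int) + 1) = ((n + 1 : Nat) : Int) := by push_cast; ring
  rw [h1, PySem.List.pyGetD_natCast, PySem.List.pyGetD_natCast]
  simp

theorem pySetD_cons_succ {α : Type} (x : α) (t : List α) (j : Int) (hj : 0 ≤ j) (v : α) :
    PySem.List.pySetD (x :: t) (j + 1) v = x :: PySem.List.pySetD t j v := by
  obtain ⟨n, rfl⟩ := Int.eq_ofNat_of_zero_le hj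
  have h1 : ((n : Int) + 1) = ((n + 1 : Nat) : Int) := by push_cast; ring
  rw [h1, PySem.List.pySetD_natCast, PySem.List.pySetD_natCast]
  simp

theorem foldl_stepB_shift_both (rest ms' : List String) (line m : String) :
    ∀ (L : List (Int × Int)) (x : String) (t : List String),
    (∀ p ∈ L, 0 ≤ p.1 ∧ 0 ≤ p.2) →
    (L.map (fun p => (p.1 + 1, p.2 + 1))).foldl (stepB (line :: rest) (m :: ms')) (x :: t)
      = x :: L.foldl (stepB rest ms') t := by
  intro L
  induction L with
  | nil => intro x t _; rfl
  | cons a L ih =>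
    intro x t hL
    obtain ⟨h1, h2⟩ := hL a List.mem_cons_self
    rw [List.map_cons, List.foldl_cons, List.foldl_cons]
    have hst : stepB (line :: rest) (m :: ms') (x :: t) (a.1 + 1, a.2 + 1)
        = x :: stepB rest ms' t a := by
      simp only [stepB, pyGetD_cons_succ _ _ _ h2, pyGetD_cons_succ _ _ _ h1,
        pySetD_cons_succ _ _ _ h2]
    rw [hst, ih _ _ (fun p hp => hL p (List.mem_cons_of_mem _ hp))]

theorem foldl_stepB_shift_idx (rest ms : List String) (line : String) :
    ∀ (L : List (Int × Int)) (x : String) (t : List String),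
    (∀ p ∈ L, 0 ≤ p.2) →
    (L.map (fun p => (p.1, p.2 + 1))).foldl (stepB (line :: rest) ms) (x :: t)
      = x :: L.foldl (stepB rest ms) t := by
  intro L
  induction L with
  | nil => intro x t _; rfl
  | cons a L ih =>
    intro x t hL
    have h2 := hL a List.mem_cons_self
    rw [List.map_cons, List.foldl_cons, List.foldl_cons]
    have hst : stepB (line :: rest) ms (x :: t) (a.1, a.2 + 1)
        = x :: stepB rest ms t a := by
      simp only [stepB, pyGetD_cons_succ _ _ _ h2, pySetD_cons_succ _ _ _ h2]
    rw [hst, ih _ _ (fun p hp => hL p (List.mem_cons_of_mem _ hp))]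

theorem B_loop (original : List String) :
    ∀ (ms : List String),
    (PySem.List.enumerate ((eligIdx original).take ms.length) 0).foldl
      (stepB original ms) original = fpRec original ms := by
  induction original with
  | nil => intro ms; simp [eligIdx, PySem.List.enumerate_nil, fpRec]
  | cons line rest ih =>
    intro ms
    rw [eligIdx_cons]
    by_cases he : eligB line
    · rw [if_pos he]
      cases ms with
      | nil =>
        simp [PySem.List.enumerate_nil, fpRec, he, fpRec_nil_ms]
      | cons m ms' =>
        have htake : (([(0 : Int)] ++ (eligIdx rest).map (· + 1)).take (m :: ms').length)
            = 0 :: ((eligIdx rest).take ms'.length).map (· + 1) := by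
          simp [List.map_take]
        rw [htake, PySem.List.enumerate_cons]
        have hmap : PySem.List.enumerate (((eligIdx rest).take ms'.length).map (· + 1)) (0 + 1)
            = (PySem.List.enumerate ((eligIdx rest).take ms'.length) 0).map
                (fun p => (p.1 + 1, p.2 + 1)) := by
          rw [enumerate_shift, enumerate_map]
          simp [Function.comp]
        rw [hmap, List.foldl_cons]
        have hst : stepB (line :: rest) (m :: ms') (line :: rest) ((0 : Int), (0 : Int))
            = subLine line m :: rest := by
          simp [stepB, subLine, PySem.List.pyGetD_zero_cons]
          rw [show ((0 : Int)) = ((0 : Nat) : Int) from rfl, PySem.List.pySetD_natCast]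
          rfl
        rw [hst]
        rw [foldl_stepB_shift_both rest ms' line m _ _ _ (by
          intro p hp
          refine ⟨mem_enumerate_zero_nonneg _ p hp, ?_⟩
          obtain ⟨k, hk, rfl⟩ := (PySem.List.mem_enumerate_iff _ _ _).1 hp
          exact mem_eligIdx_nonneg rest _ (List.mem_of_mem_take (List.getElem_mem hk)))]
        rw [ih ms']
        simp [fpRec, he]
    · rw [if_neg he, List.nil_append]
      have htake : (((eligIdx rest).map (· + 1)).take ms.length)
          = ((eligIdx rest).take ms.length).map (· + 1) := by
        simp [List.map_take]
      rw [htake]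
      have hmap : PySem.List.enumerate (((eligIdx rest).take ms.length).map (· + 1)) 0
          = (PySem.List.enumerate ((eligIdx rest).take ms.length) 0).map
              (fun p => (p.1, p.2 + 1)) := by
        rw [enumerate_map]
      rw [hmap]
      rw [foldl_stepB_shift_idx rest ms line _ _ _ (by
        intro p hp
        obtain ⟨k, hk, rfl⟩ := (PySem.List.mem_enumerate_iff _ _ _).1 hp
        exact mem_eligIdx_nonneg rest _ (List.mem_of_mem_take (List.getElem_mem hk)))]
      rw [ih ms]
      simp [fpRec, he]

theorem B_eq (original modified : List String) :
    final_power_alt original modified = fpRec original modified := by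
  unfold final_power_alt
  rw [PySem.List.slice_to_natCast]
  exact B_loop original modified

-- ===== VERDICT (by name: the statement is the Claim_ definition above) =====
theorem final_power_spec : Claim_equal_final_power := by
  intro original modified _
  unfold Spec_final_power
  rw [A_eq, B_eq]
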